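-- pv_equiv track=rewrite | github.com/mango9236/backjoon | 프로그래머스/unrated/160586. 대충 만든 자판/대충 만든 자판.py | solution
-- ===== SOURCE A (Python) =====
-- def solution(keymap, targets):
--     key_dic = {}
--     for key in keymap:
--          for i in range(65, 91):
--                 check = chr(i)
--                 num = key.find(check)
--                 # -1(문자가 없음) -> 넘어감
--                 if num == -1:
--                     continue
--                 # check 값이 딕셔너리에 없거나 새로운 값이 더 작은경우 -> 갱신
--                 if check not in key_dic or key_dic[check] > num:
--                     key_dic[check] = num+1
--
--     result = []
--
--     for word in targets:
--         cnt = 0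
--         check = True # 키 값이 없는지 체크
--
--         for i in word:
--             # 만약 key가 없을 경우
--             if i not in key_dic:
--                 check = False
--                 result.append(-1)
--                 break
--             cnt += key_dic[i]
--
--         if check == True:
--             result.append(cnt)
--
--     return result
-- ===== SOURCE B (Python) =====
-- def solution(keymap, targets):
--     # price per letter: minimum first position (1-based) over all keys, computed letter-by-letter
--     # as min() of the collected find results, instead of incremental dict updates per key
--     price = {}
--     for code in range(65, 91):
--         letter = chr(code)
--         hits = [pos for pos in (key.find(letter) for key in keymap) if pos != -1]
--         if hits:
--             price[letter] = min(hits) + 1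
--
--     def cost(word):
--         # a word is a multiset of characters: total = sum of multiplicity * price over distinct chars
--         letters = set(word)
--         if all(ch in price for ch in letters):
--             return sum(word.count(ch) * price[ch] for ch in letters)
--         return -1
--
--     return [cost(word) for word in targets]
-- ===== Notes on version B (the rewrite author's own statement) =====
-- stated objective: alternative
-- what changed: B transposes the loops and replaces the incremental structures: the per-letter price is min() of the list of all keys' find results (one dict write per letter, no conditional min-update per key), and each word is treated as a multiset, summing count(ch)*price[ch] over its distinct characters instead of A's per-character accumulator loop with a break flag.
import Mathlib
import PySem

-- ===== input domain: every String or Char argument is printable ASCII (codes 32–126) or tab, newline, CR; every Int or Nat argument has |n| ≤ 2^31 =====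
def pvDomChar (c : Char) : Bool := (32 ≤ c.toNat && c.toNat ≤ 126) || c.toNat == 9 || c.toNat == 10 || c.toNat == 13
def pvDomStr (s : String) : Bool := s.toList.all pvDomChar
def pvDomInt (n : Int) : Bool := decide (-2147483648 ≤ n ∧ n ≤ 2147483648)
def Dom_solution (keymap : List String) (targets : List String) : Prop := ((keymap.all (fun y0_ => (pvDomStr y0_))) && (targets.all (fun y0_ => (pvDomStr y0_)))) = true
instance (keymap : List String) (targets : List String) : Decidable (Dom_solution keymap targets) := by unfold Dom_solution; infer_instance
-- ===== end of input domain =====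

-- B computes each letter's price as min() of the collected per-key find results (loops transposed,
-- no incremental min-update), and costs a word as a multiset: sum of count*price over its distinct
-- characters; objective: alternative (same asymptotic cost, different algorithmic decomposition).

-- ===== PORT A =====
-- body of A's alphabet loop: i is the code point, check = chr(i); key_dic[check] is read via
-- getD (safe: guarded by the 'check not in key_dic' short-circuit)
def solKeyStepA (key : String) (d : PySem.Dict Char Int) (i : Int) : PySem.Dict Char Int :=
  let check := Char.ofNat i.toNat
  let num := PySem.Str.find key (String.ofList [check])
  if num = -1 then d
  else if d.contains check = false ∨ num < d.getD check 0 then d.insert check (num + 1)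
  else d

-- A's per-word loop with break: none = the 'check = False' path (a char had no key);
-- key_dic[i] is read via getD (safe: guarded by the contains test)
def solWordA (d : PySem.Dict Char Int) : List Char → Int → Option Int
  | [], cnt => some cnt
  | c :: rest, cnt =>
    if d.contains c = false then none
    else solWordA d rest (cnt + d.getD c 0)

def solution (keymap : List String) (targets : List String) : List Int :=
  let key_dic := keymap.foldl
    (fun d key => (PySem.List.pyRange 65 91 1).foldl (solKeyStepA key) d) PySem.Dict.empty
  targets.foldl (fun result word =>
    match solWordA key_dic word.toList 0 with
    | none => result ++ [(-1 : Int)]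
    | some cnt => result ++ [cnt]) []

-- ===== PORT B =====
-- body of B's letter loop: hits = [pos for pos in (key.find(letter) for key in keymap) if pos != -1];
-- 'if hits: price[letter] = min(hits) + 1' is the match on min? (none exactly when hits == [])
def neNegOne (pos : Int) : Bool := pos ≠ -1

def priceStep (keymap : List String) (d : PySem.Dict Char Int) (code : Int) : PySem.Dict Char Int :=
  let letter := Char.ofNat code.toNat
  let hits := (keymap.map (fun key => PySem.Str.find key (String.ofList [letter]))).filter neNegOne
  match PySem.List.min? hits (fun x => x) with
  | some m => d.insert letter (m + 1)
  | none => d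

-- cost(word): set(word) = PySem.Set.ofList; word.count(ch) of a single character is exactly the
-- element count of ch in the character list; summation order over the set cannot affect an int sum
def costB (price : PySem.Dict Char Int) (word : String) : Int :=
  let letters := PySem.Set.ofList word.toList
  if letters.all (fun ch => price.contains ch)
  then (letters.map (fun ch => (word.toList.count ch : Int) * price.getD ch 0)).sum
  else -1

def solution_alt (keymap : List String) (targets : List String) : List Int :=
  let price := (PySem.List.pyRange 65 91 1).foldl (priceStep keymap) PySem.Dict.empty
  targets.map (costB price)

-- ===== PRECONDITION & SPEC =====
def Spec_solution (keymap : List String) (targets : List String) (out : List Int) : Prop := out = solution_alt keymap targets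
instance (keymap : List String) (targets : List String) (out : List Int) : Decidable (Spec_solution keymap targets out) := by unfold Spec_solution; infer_instance

-- ===== CLAIM (what is proved, stated in full; the proofs are below) =====
def Claim_equal_solution : Prop := ∀ (keymap : List String) (targets : List String), Dom_solution keymap targets → Spec_solution keymap targets (solution keymap targets)

-- ===== LEMMAS AND PROOFS =====

-- the effect of one key on the entry for c: if c occurs in the key (first index j), the stored
-- value becomes min(old, j+1), else unchanged
def comb (key : List Char) (c : Char) (o : Option Int) : Option Int :=
  match key.idxOf? c with
  | none => o
  | some j => some (match o with | none => (j : Int) + 1 | some v => min v ((j : Int) + 1))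

theorem comb_idem (key : List Char) (c : Char) (o : Option Int) :
    comb key c (comb key c o) = comb key c o := by
  unfold comb
  cases h : key.idxOf? c with
  | none => rfl
  | some j => cases o <;> simp

-- s.find(c) for a single char is the first index of c, or -1
theorem find_single (s : List Char) (c : Char) :
    PySem.Chars.find s [c] = (match s.idxOf? c with | none => -1 | some j => (j : Int)) := by
  cases h : s.idxOf? c with
  | none =>
    have hmem : c ∉ s := List.idxOf?_eq_none_iff.mp h
    have : ¬ [c] <:+: s := fun hin => hmem ((List.singleton_infix_iff c s).mp hin)
    simpa using (PySem.Chars.find_eq_neg_one_iff (s := s) (sub := [c])).mpr this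
  | some j =>
    have hdec := PySem.List.index?_eq_some_iff (xs := s) (v := c) (k := j)
    simp only [PySem.List.index?_eq_idxOf?] at hdec
    obtain ⟨pre, suf, hs, hlen, hnot⟩ := hdec.mp h
    have hmem : c ∈ s := by rw [hs]; simp
    have hinf : [c] <:+: s := (List.singleton_infix_iff c s).mpr hmem
    have hpos : 0 ≤ PySem.Chars.find s [c] := (PySem.Chars.find_nonneg_iff (s := s) (sub := [c])).mpr hinf
    obtain ⟨hpre, hmin⟩ := PySem.Chars.find_spec (s := s) (sub := [c]) hpos
    set f := (PySem.Chars.find s [c]).toNat with hf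
    have hdropj : s.drop j = c :: suf := by
      rw [hs, ← hlen, List.drop_left' rfl]
    have hatj : [c] <+: s.drop j := by rw [hdropj]; exact ⟨suf, rfl⟩
    have h1 : ¬ (j < f) := fun hlt => hmin j hlt hatj
    have h2 : ¬ (f < j) := by
      intro hlt
      obtain ⟨t, ht⟩ := hpre
      have hget : s[f]? = some c := by
        have : (s.drop f).head? = some c := by rw [← ht]; rfl
        rwa [List.head?_drop] at this
      have : pre[f]? = some c := by
        rw [hs] at hget
        rwa [List.getElem?_append_left (by omega)] at hget
      exact hnot (List.mem_of_getElem? this)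
    show PySem.Chars.find s [c] = (j : Int)
    omega

theorem stepA_get? (key : String) (d : PySem.Dict Char Int) (i : Int) (c : Char) :
    (solKeyStepA key d i).get? c =
      if Char.ofNat i.toNat = c then comb key.toList c (d.get? c) else d.get? c := by
  unfold solKeyStepA comb
  have hfind : PySem.Str.find key (String.ofList [Char.ofNat i.toNat])
      = (match key.toList.idxOf? (Char.ofNat i.toNat) with | none => -1 | some j => (j : Int)) := by
    have := find_single key.toList (Char.ofNat i.toNat)
    simpa using this
  set ch := Char.ofNat i.toNat with hch
  simp only [hfind]
  by_cases hc : ch = c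
  · subst hc
    cases hidx : key.toList.idxOf? ch with
    | none => simp
    | some j =>
      simp only [hidx]  -- the linter flags this as unused, but it is needed to reduce the match
      have hne : ¬ ((j : Int) = -1) := by omega
      rw [if_neg hne]
      cases ho : d.get? ch with
      | none =>
        have hcont : d.contains ch = false := by
          rw [PySem.Dict.contains_eq_isSome_get?, ho]; rfl
        rw [if_pos (Or.inl hcont)]
        simp [PySem.Dict.get?_insert_self]
      | some v =>
        have hcont : d.contains ch = true := by
          rw [PySem.Dict.contains_eq_isSome_get?, ho]; rfl
        have hgetD : d.getD ch 0 = v := by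
          rw [PySem.Dict.getD_eq_get?_getD, ho]; rfl
        by_cases hv : (j : Int) < v
        · rw [if_pos (Or.inr (by rw [hgetD]; exact hv))]
          rw [PySem.Dict.get?_insert_self]
          show some ((j : Int) + 1) = some (min v ((j : Int) + 1))
          congr 1
          omega
        · rw [if_neg (by rw [hcont, hgetD]; simp; omega)]
          rw [ho]
          show some v = some (min v ((j : Int) + 1))
          congr 1
          omega
  · rw [if_neg hc]
    cases hidx : key.toList.idxOf? ch with
    | none => rw [if_pos rfl]
    | some j =>
      simp only [hidx]  -- the linter flags this as unused, but it is needed to reduce the match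
      have hne : ¬ ((j : Int) = -1) := by omega
      rw [if_neg hne]
      by_cases hcd : d.contains ch = false ∨ (j : Int) < d.getD ch 0
      · rw [if_pos hcd, PySem.Dict.get?_insert_of_ne d _ (fun h => hc h.symm)]
      · rw [if_neg hcd]

theorem foldA_get? (key : String) (L : List Int) (d : PySem.Dict Char Int) (c : Char) :
    (L.foldl (solKeyStepA key) d).get? c =
      if ∃ i ∈ L, Char.ofNat i.toNat = c then comb key.toList c (d.get? c) else d.get? c := by
  induction L generalizing d with
  | nil => simp
  | cons a t ih =>
    simp only [List.foldl_cons]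
    rw [ih]
    by_cases ha : Char.ofNat a.toNat = c
    · rw [stepA_get? key d a c, if_pos ha]
      by_cases ht : ∃ i ∈ t, Char.ofNat i.toNat = c
      · rw [if_pos ht, if_pos ⟨a, List.mem_cons_self, ha⟩, comb_idem]
      · rw [if_neg ht, if_pos ⟨a, List.mem_cons_self, ha⟩]
    · rw [stepA_get? key d a c, if_neg ha]
      by_cases ht : ∃ i ∈ t, Char.ofNat i.toNat = c
      · obtain ⟨i, hi, hic⟩ := ht
        rw [if_pos ⟨i, hi, hic⟩, if_pos ⟨i, List.mem_cons_of_mem a hi, hic⟩]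
      · rw [if_neg ht, if_neg (by
          rintro ⟨i, hi, hic⟩
          rcases List.mem_cons.mp hi with h | h
          · exact ha (h ▸ hic)
          · exact ht ⟨i, h, hic⟩)]

theorem range_char (c : Char) :
    (∃ i ∈ PySem.List.pyRange 65 91 1, Char.ofNat i.toNat = c) ↔ (65 ≤ c.toNat ∧ c.toNat ≤ 90) := by
  constructor
  · rintro ⟨i, hi, hic⟩
    rw [PySem.List.mem_pyRange_one] at hi
    have hv : (Char.ofNat i.toNat).toNat = i.toNat := by
      rw [Char.toNat_ofNat, if_pos]
      unfold Nat.isValidChar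
      left
      omega
    rw [← hic, hv]
    omega
  · rintro ⟨h1, h2⟩
    refine ⟨(c.toNat : Int), ?_, ?_⟩
    · rw [PySem.List.mem_pyRange_one]; omega
    · rw [Int.toNat_natCast, Char.ofNat_toNat]

-- A's whole key_dic, entrywise: fold comb over the keys (for uppercase letters only)
theorem dictA_get? (keymap : List String) (d : PySem.Dict Char Int) (c : Char) :
    (keymap.foldl (fun d key => (PySem.List.pyRange 65 91 1).foldl (solKeyStepA key) d) d).get? c =
      if 65 ≤ c.toNat ∧ c.toNat ≤ 90
      then keymap.foldl (fun o key => comb key.toList c o) (d.get? c)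
      else d.get? c := by
  induction keymap generalizing d with
  | nil => simp
  | cons key t ih =>
    simp only [List.foldl_cons]
    rw [ih, foldA_get?]
    by_cases hup : 65 ≤ c.toNat ∧ c.toNat ≤ 90
    · rw [if_pos hup, if_pos hup, if_pos ((range_char c).mpr hup)]
    · rw [if_neg hup, if_neg hup, if_neg (fun hh => hup ((range_char c).mp hh))]

-- A's incremental min-update, expressed on the find value
def gstep (o : Option Int) (p : Int) : Option Int :=
  if p = -1 then o else some (match o with | none => p + 1 | some v => min v (p + 1))

theorem comb_eq_gstep (key : String) (c : Char) (o : Option Int) :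
    comb key.toList c o = gstep o (PySem.Str.find key (String.ofList [c])) := by
  unfold comb gstep
  have hfind : PySem.Str.find key (String.ofList [c])
      = (match key.toList.idxOf? c with | none => -1 | some j => (j : Int)) := by
    have := find_single key.toList c
    simpa using this
  rw [hfind]
  cases h : key.toList.idxOf? c with
  | none => simp
  | some j =>
    have : ¬ ((j : Int) = -1) := by omega
    simp [this]

theorem foldl_min_min (t : List Int) (x y : Int) :
    t.foldl min (min x y) = min x (t.foldl min y) := by
  induction t generalizing y with
  | nil => simp
  | cons a t ih => simp only [List.foldl_cons, min_assoc, ih]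

-- the incremental fold over all find values equals min() of the filtered hits list
theorem gstep_fold (F : List Int) (o : Option Int) :
    F.foldl gstep o =
      match PySem.List.min? (F.filter neNegOne) (fun x => x) with
      | none => o
      | some m => some (match o with | none => m + 1 | some v => min v (m + 1)) := by
  induction F generalizing o with
  | nil => simp [PySem.List.min?]
  | cons p F ih =>
    simp only [List.foldl_cons, List.filter_cons]
    by_cases hp : p = -1
    · have hf : neNegOne p = false := by simp [neNegOne, hp]
      rw [hf]
      simp only [Bool.false_eq_true, if_false]
      rw [show gstep o p = o from by unfold gstep; rw [if_pos hp]]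
      exact ih o
    · have hf : neNegOne p = true := by simp [neNegOne, hp]
      rw [hf]
      simp only [if_true]
      rw [ih]
      cases hmin : PySem.List.min? (F.filter neNegOne) (fun x => x) with
      | none =>
        have hF : F.filter neNegOne = [] := (PySem.List.min?_eq_none_iff _ _).mp hmin
        rw [hF, PySem.List.min?_id_cons]
        simp only [List.foldl_nil]
        unfold gstep
        rw [if_neg hp]
      | some m =>
        cases hF : F.filter neNegOne with
        | nil => rw [hF] at hmin; simp [PySem.List.min?] at hmin
        | cons h' t' =>
          rw [hF] at hmin
          rw [PySem.List.min?_id_cons] at hmin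
          have hm : m = t'.foldl min h' := by injection hmin with hh; omega
          rw [PySem.List.min?_id_cons]
          have hfold : (h' :: t').foldl min p = min p m := by
            simp only [List.foldl_cons]
            rw [foldl_min_min t' p h', hm]
          rw [hfold]
          unfold gstep
          rw [if_neg hp]
          cases o <;> simp

-- B's step combinator on one entry
def bcomb (keymap : List String) (c : Char) (o : Option Int) : Option Int :=
  match PySem.List.min?
      ((keymap.map (fun key => PySem.Str.find key (String.ofList [c]))).filter neNegOne)
      (fun x => x) with
  | some m => some (m + 1)
  | none => o

theorem bcomb_idem (keymap : List String) (c : Char) (o : Option Int) :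
    bcomb keymap c (bcomb keymap c o) = bcomb keymap c o := by
  unfold bcomb
  cases h : PySem.List.min?
      ((keymap.map (fun key => PySem.Str.find key (String.ofList [c]))).filter neNegOne)
      (fun x => x) <;> simp

theorem priceStep_get? (keymap : List String) (d : PySem.Dict Char Int) (i : Int) (c : Char) :
    (priceStep keymap d i).get? c =
      if Char.ofNat i.toNat = c then bcomb keymap c (d.get? c) else d.get? c := by
  by_cases hc : Char.ofNat i.toNat = c
  · rw [if_pos hc]
    unfold priceStep bcomb
    dsimp only
    rw [hc]
    cases h : PySem.List.min?
        ((keymap.map (fun key => PySem.Str.find key (String.ofList [c]))).filter neNegOne)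
        (fun x => x) with
    | none => rfl
    | some m =>
      show (d.insert c (m + 1)).get? c = some (m + 1)
      rw [PySem.Dict.get?_insert_self]
  · rw [if_neg hc]
    unfold priceStep
    dsimp only
    cases h : PySem.List.min?
        ((keymap.map (fun key =>
          PySem.Str.find key (String.ofList [Char.ofNat i.toNat]))).filter neNegOne)
        (fun x => x) with
    | none => rfl
    | some m =>
      show (d.insert (Char.ofNat i.toNat) (m + 1)).get? c = d.get? c
      rw [PySem.Dict.get?_insert_of_ne d _ (fun hh => hc hh.symm)]

theorem foldB_get? (keymap : List String) (L : List Int) (d : PySem.Dict Char Int) (c : Char) :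
    (L.foldl (priceStep keymap) d).get? c =
      if ∃ i ∈ L, Char.ofNat i.toNat = c then bcomb keymap c (d.get? c) else d.get? c := by
  induction L generalizing d with
  | nil => simp
  | cons a t ih =>
    simp only [List.foldl_cons]
    rw [ih]
    by_cases ha : Char.ofNat a.toNat = c
    · rw [priceStep_get? keymap d a c, if_pos ha]
      by_cases ht : ∃ i ∈ t, Char.ofNat i.toNat = c
      · rw [if_pos ht, if_pos ⟨a, List.mem_cons_self, ha⟩, bcomb_idem]
      · rw [if_neg ht, if_pos ⟨a, List.mem_cons_self, ha⟩]
    · rw [priceStep_get? keymap d a c, if_neg ha]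
      by_cases ht : ∃ i ∈ t, Char.ofNat i.toNat = c
      · obtain ⟨i, hi, hic⟩ := ht
        rw [if_pos ⟨i, hi, hic⟩, if_pos ⟨i, List.mem_cons_of_mem a hi, hic⟩]
      · rw [if_neg ht, if_neg (by
          rintro ⟨i, hi, hic⟩
          rcases List.mem_cons.mp hi with h | h
          · exact ha (h ▸ hic)
          · exact ht ⟨i, h, hic⟩)]

-- both dicts agree entrywise
theorem dicts_agree (keymap : List String) (c : Char) :
    (keymap.foldl (fun d key => (PySem.List.pyRange 65 91 1).foldl (solKeyStepA key) d)
      PySem.Dict.empty).get? c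
    = ((PySem.List.pyRange 65 91 1).foldl (priceStep keymap) PySem.Dict.empty).get? c := by
  rw [dictA_get?, foldB_get?]
  by_cases hup : 65 ≤ c.toNat ∧ c.toNat ≤ 90
  · rw [if_pos hup, if_pos ((range_char c).mpr hup)]
    have hA : keymap.foldl (fun o key => comb key.toList c o)
        ((PySem.Dict.empty : PySem.Dict Char Int).get? c)
        = (keymap.map (fun key => PySem.Str.find key (String.ofList [c]))).foldl gstep
          ((PySem.Dict.empty : PySem.Dict Char Int).get? c) := by
      rw [List.foldl_map]
      exact PySem.List.foldl_congr_mem keymap _ _ _ (fun o key _ => comb_eq_gstep key c o)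
    rw [hA, gstep_fold]
    unfold bcomb
    cases PySem.List.min?
        ((keymap.map (fun key => PySem.Str.find key (String.ofList [c]))).filter neNegOne)
        (fun x => x) <;> rfl
  · rw [if_neg hup, if_neg (fun hh => hup ((range_char c).mp hh))]

theorem wordA_eq (d : PySem.Dict Char Int) (w : List Char) (cnt : Int) :
    solWordA d w cnt =
      if w.all (fun c => d.contains c)
      then some (cnt + (w.map (fun c => d.getD c 0)).sum)
      else none := by
  induction w generalizing cnt with
  | nil => simp [solWordA]
  | cons c rest ih =>
    simp only [solWordA, List.all_cons, List.map_cons, List.sum_cons]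
    cases hc : d.contains c with
    | false => simp
    | true =>
      rw [if_neg (by simp), ih]
      by_cases hr : rest.all (fun c => d.contains c)
      · rw [if_pos hr]
        simp [hr, add_assoc]
      · rw [if_neg hr]
        simp [hr]

theorem foldl_append_map (g : String → Int) (l : List String) (acc : List Int) :
    l.foldl (fun r w => r ++ [g w]) acc = acc ++ l.map g := by
  induction l generalizing acc with
  | nil => simp
  | cons h t ih => simp [ih]

theorem sum_ite_notmem (S : List Char) (x : Char) (f : Char → Int) (hx : x ∉ S) :
    (S.map (fun ch => if ch = x then f ch else 0)).sum = 0 := by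
  induction S with
  | nil => simp
  | cons s S ih =>
    have hne : ¬ (s = x) := fun h => hx (h ▸ List.mem_cons_self)
    simp only [List.map_cons, List.sum_cons, if_neg hne]
    rw [ih (fun h => hx (List.mem_cons_of_mem s h))]
    omega

theorem sum_ite_mem (S : List Char) (x : Char) (f : Char → Int)
    (hnd : S.Nodup) (hx : x ∈ S) :
    (S.map (fun ch => if ch = x then f ch else 0)).sum = f x := by
  induction S with
  | nil => cases hx
  | cons s S ih =>
    rcases List.mem_cons.mp hx with h | h
    · rw [← h] at hnd ⊢
      have hrest := sum_ite_notmem S x f (List.nodup_cons.mp hnd).1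
      simp [hrest]
    · have hne : ¬ (s = x) := fun hh => (List.nodup_cons.mp hnd).1 (hh ▸ h)
      simp only [List.map_cons, List.sum_cons, if_neg hne]
      rw [ih (List.nodup_cons.mp hnd).2 h]
      omega

-- sum over the word = sum over distinct characters weighted by multiplicity
theorem multiset_sum (w : List Char) (S : List Char) (f : Char → Int)
    (hnd : S.Nodup) (hsub : ∀ c ∈ w, c ∈ S) :
    (S.map (fun ch => (w.count ch : Int) * f ch)).sum = (w.map f).sum := by
  induction w with
  | nil => simp
  | cons x w ih =>
    have hsplit : ∀ ch, ((List.count ch (x :: w) : Int) * f ch)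
        = (List.count ch w : Int) * f ch + (if ch = x then f ch else 0) := by
      intro ch
      by_cases h : ch = x
      · subst h
        rw [List.count_cons_self, if_pos rfl]
        push_cast
        ring
      · rw [List.count_cons_of_ne (fun hh => h hh.symm), if_neg h]
        ring
    rw [List.map_congr_left (fun ch _ => hsplit ch), PySem.List.sum_map_add_int,
        ih (fun c hc => hsub c (List.mem_cons_of_mem x hc)),
        sum_ite_mem S x f hnd (hsub x List.mem_cons_self)]
    rw [List.map_cons, List.sum_cons]
    ring

-- ===== VERDICT (by name: the statement is the Claim_ definition above) =====
theorem solution_spec : Claim_equal_solution := by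
  intro keymap targets _
  unfold Spec_solution solution solution_alt
  dsimp only
  set dA := keymap.foldl (fun d key => (PySem.List.pyRange 65 91 1).foldl (solKeyStepA key) d)
    PySem.Dict.empty with hdA
  set dB := (PySem.List.pyRange 65 91 1).foldl (priceStep keymap) PySem.Dict.empty with hdB
  have hpt : ∀ c, dA.get? c = dB.get? c := dicts_agree keymap
  have hcont : ∀ c, dA.contains c = dB.contains c := by
    intro c
    rw [PySem.Dict.contains_eq_isSome_get?, PySem.Dict.contains_eq_isSome_get?, hpt c]
  have hgetD : ∀ c, dA.getD c 0 = dB.getD c 0 := by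
    intro c
    rw [PySem.Dict.getD_eq_get?_getD, PySem.Dict.getD_eq_get?_getD, hpt c]
  have hbody : (fun (result : List Int) (word : String) =>
      match solWordA dA word.toList 0 with
      | none => result ++ [(-1 : Int)]
      | some cnt => result ++ [cnt])
      = (fun result word => result ++ [(match solWordA dA word.toList 0 with
          | none => (-1 : Int) | some cnt => cnt)]) := by
    funext r w
    cases solWordA dA w.toList 0 <;> rfl
  rw [hbody, foldl_append_map, List.nil_append]
  apply List.map_congr_left
  intro w _
  rw [wordA_eq]
  unfold costB
  simp only [hcont, hgetD]
  have hmemS : ∀ c, c ∈ PySem.Set.ofList w.toList ↔ c ∈ w.toList := by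
    intro c
    exact PySem.Set.mem_ofList (xs := w.toList) (y := c)
  by_cases hall : w.toList.all (fun c => dB.contains c)
  · have hallS : (PySem.Set.ofList w.toList).all (fun c => dB.contains c) = true := by
      rw [List.all_eq_true] at hall ⊢
      intro c hc
      exact hall c ((hmemS c).mp hc)
    rw [if_pos hall, if_pos hallS]
    have := multiset_sum w.toList (PySem.Set.ofList w.toList) (fun c => dB.getD c 0)
      (PySem.Set.nodup_ofList w.toList) (fun c hc => (hmemS c).mpr hc)
    simp only [this]
    simp
  · have hallS : ¬ ((PySem.Set.ofList w.toList).all (fun c => dB.contains c) = true) := by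
      rw [List.all_eq_true] at hall ⊢
      intro hc
      exact hall (fun c hcc => hc c ((hmemS c).mpr hcc))
    rw [if_neg hall, if_neg hallS]
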